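-- pv_equiv track=rewrite | github.com/afrunt/ora2pg | ora2pg_conf_initializer.py | filter_lines_with_settings
-- ===== SOURCE A (Python) =====
-- def filter_lines_with_settings(lines):
--     """ filters the lines and returns only strings that contain required or optional setting """
--
--     def is_setting(line):
--         skipped_prefixes = ["# ", "#-", "##", "#WHERE", "#in"]
--         return len(line) > 2 and not [p for p in skipped_prefixes if line.startswith(p)]
--
--     def clear_line(line):
--         return ' '.join(line.strip().split())
--
--     def remove_comments(line):
--         result = remove_comments(line[:line.rfind("#")]) if line.count("#") > 1 else line
--         return result.strip()
--
--     return [remove_comments(line) for line in map(clear_line, lines) if is_setting(line)]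
-- ===== SOURCE B (Python) =====
-- def filter_lines_with_settings(lines):
--     """ filters the lines and returns only strings that contain required or optional setting """
--     skipped_prefixes = ("# ", "#-", "##", "#WHERE", "#in")
--     result = []
--     for raw in lines:
--         line = ' '.join(raw.split())
--         if len(line) > 2 and not line.startswith(skipped_prefixes):
--             i = line.find('#')
--             if i != -1:
--                 j = line[i + 1:].find('#')
--                 if j != -1:
--                     line = line[:i + 1 + j]
--             result.append(line.strip())
--     return result
-- ===== Notes on version B (the rewrite author's own statement) =====
-- stated objective: faster
-- what changed: remove_comments' recursion (repeatedly re-scanning and cutting at the last '#' until at most one remains) is replaced by a closed-form cut just before the second '#' located with two find() calls, and the comprehension pipeline by one explicit accumulator loop with a tuple startswith test.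
import Mathlib
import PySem

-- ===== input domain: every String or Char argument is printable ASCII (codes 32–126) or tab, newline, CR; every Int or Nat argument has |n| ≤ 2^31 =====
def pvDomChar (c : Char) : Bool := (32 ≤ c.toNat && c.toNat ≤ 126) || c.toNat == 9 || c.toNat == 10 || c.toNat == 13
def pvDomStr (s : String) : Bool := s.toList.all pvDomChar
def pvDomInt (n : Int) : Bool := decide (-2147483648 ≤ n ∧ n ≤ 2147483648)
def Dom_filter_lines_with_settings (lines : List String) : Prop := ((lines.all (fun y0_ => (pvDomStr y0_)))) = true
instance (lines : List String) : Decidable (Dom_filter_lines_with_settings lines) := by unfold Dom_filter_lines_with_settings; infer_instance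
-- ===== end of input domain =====

-- B replaces A's recursive remove_comments (re-cut at the last '#' until one is left) by a
-- closed-form two-`find` cut and the comprehension by one accumulator loop (measured faster).

-- ===== PORT A =====
-- The next lemmas exist only so that A's recursive remove_comments can be shown
-- terminating (cited by name in `decreasing_by`): the slice strictly shrinks the line.
theorem prefix_single (c : Char) (l : List Char) :
    List.isPrefixOf [c] l = true ↔ ∃ t, l = c :: t := by
  cases l with
  | nil => simp [List.isPrefixOf]
  | cons h t =>
    simp [List.isPrefixOf]
    constructor
    · intro h'; exact h'.symm
    · intro h'; exact h'.symm

theorem go_count (c : Char) : ∀ (l : List Char) (fuel acc : Nat), l.length ≤ fuel →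
    PySem.Chars.count.go [c] fuel l acc = acc + l.count c := by
  intro l
  induction l with
  | nil => intro fuel acc h; cases fuel <;> simp [PySem.Chars.count.go]
  | cons hd t ih =>
    intro fuel acc h
    cases fuel with
    | zero => simp at h
    | succ f =>
      simp only [PySem.Chars.count.go]
      by_cases hc : hd = c
      · subst hc
        have hp : List.isPrefixOf [hd] (hd :: t) = true := by simp [List.isPrefixOf]
        simp only [hp, if_true, List.length_cons, List.length_nil, List.drop_succ_cons,
          List.drop_zero, ih f (acc + 1) (by simpa using h), List.count_cons]
        simp
        omega
      · have hp : List.isPrefixOf [c] (hd :: t) = false := by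
          simp [List.isPrefixOf, hc]; intro h'; exact absurd h'.symm hc
        simp only [hp, Bool.false_eq_true, if_false, ih f acc (by simpa using h), List.count_cons]
        simp [hc]

theorem pv_count_char (cs : List Char) (c : Char) :
    PySem.Chars.count cs [c] = cs.count c := by
  simp [PySem.Chars.count, go_count c cs cs.length 0 le_rfl]

theorem pv_mem_last_split (cs : List Char) (c : Char) (h : c ∈ cs) :
    ∃ u v, cs = u ++ c :: v ∧ c ∉ v := by
  induction cs with
  | nil => simp at h
  | cons hd t ih =>
    by_cases hm : c ∈ t
    · obtain ⟨u, v, he, hv⟩ := ih hm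
      exact ⟨hd :: u, v, by rw [he]; rfl, hv⟩
    · have : hd = c := by rcases List.mem_cons.1 h with h' | h'; exact h'.symm; exact absurd h' hm
      exact ⟨[], t, by simp [this], hm⟩

theorem go_rfind (u v : List Char) (c : Char) (hv : c ∉ v) :
    ∀ j, u.length ≤ j → j ≤ (u ++ c :: v).length →
      PySem.Chars.rfind.go (u ++ c :: v) [c] j = (u.length : Int) := by
  intro j
  induction j with
  | zero =>
    intro h1 h2
    have hu : u = [] := by simpa using h1
    subst hu
    simp [PySem.Chars.rfind.go, (prefix_single c (c :: v)).2 ⟨v, rfl⟩]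
  | succ j ih =>
    intro h1 h2
    rcases Nat.lt_or_ge j u.length with hlt | hge
    · -- u.length = j+1
      have he : u.length = j + 1 := by omega
      have hd : List.drop (j + 1) (u ++ c :: v) = c :: v := by
        rw [← he, List.drop_left]
      simp [PySem.Chars.rfind.go, hd, (prefix_single c (c :: v)).2 ⟨v, rfl⟩, he]
    · -- j+1 > u.length: the dropped suffix is inside v
      have hd : List.drop (j + 1) (u ++ c :: v) = List.drop (j - u.length) v := by
        rw [List.drop_append, List.drop_of_length_le (by omega)]
        have : j + 1 - u.length = (j - u.length) + 1 := by omega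
        rw [this]
        simp
      have hnp : List.isPrefixOf [c] (List.drop (j + 1) (u ++ c :: v)) = false := by
        rw [hd]
        by_contra hcon
        have : List.isPrefixOf [c] (List.drop (j - u.length) v) = true := by
          revert hcon; cases (List.isPrefixOf [c] (List.drop (j - u.length) v)) <;> simp
        obtain ⟨t, ht⟩ := (prefix_single _ _).1 this
        have : c ∈ v := by
          have hmem : c ∈ List.drop (j - u.length) v := by
            rw [ht]; exact List.mem_cons_self
          exact List.mem_of_mem_drop hmem
        exact hv this
      simp only [PySem.Chars.rfind.go, hnp, Bool.false_eq_true, if_false]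
      exact ih hge (by omega)

theorem pv_rfind_char (u v : List Char) (c : Char) (hv : c ∉ v) :
    PySem.Chars.rfind (u ++ c :: v) [c] = (u.length : Int) := by
  exact go_rfind u v c hv _ (by simp) le_rfl

theorem pvRfindSliceLen (line : List Char) (h : PySem.Chars.count line ['#'] > 1) :
    (PySem.List.slice line none (some (PySem.Chars.rfind line ['#']))).length < line.length := by
  rw [pv_count_char] at h
  obtain ⟨u, v, he, hv⟩ := pv_mem_last_split line '#' (List.count_pos_iff.mp (by omega))
  rw [he, pv_rfind_char u v '#' hv, PySem.List.slice_to _ (by positivity)]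
  simp

-- skipped_prefixes = ["# ", "#-", "##", "#WHERE", "#in"]
def pvSkippedPrefixes : List (List Char) :=
  [['#', ' '], ['#', '-'], ['#', '#'], ['#', 'W', 'H', 'E', 'R', 'E'], ['#', 'i', 'n']]

-- is_setting: len(line) > 2 and not [p for p in skipped_prefixes if line.startswith(p)]
-- (truthiness of the comprehension list = its non-emptiness)
def pvIsSetting (line : List Char) : Bool :=
  decide (line.length > 2) && (pvSkippedPrefixes.filter (fun p => PySem.Chars.startswith line p)).isEmpty

-- clear_line: ' '.join(line.strip().split())
def pvClearLine (line : List Char) : List Char :=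
  PySem.Chars.join [' '] (PySem.Chars.split₀ (PySem.Chars.strip line))

-- remove_comments: result = remove_comments(line[:line.rfind("#")]) if line.count("#") > 1 else line
--                  return result.strip()
def pvRemoveComments (line : List Char) : List Char :=
  if h : PySem.Chars.count line ['#'] > 1 then
    PySem.Chars.strip (pvRemoveComments (PySem.List.slice line none (some (PySem.Chars.rfind line ['#']))))
  else
    PySem.Chars.strip line
termination_by line.length
decreasing_by exact pvRfindSliceLen line h

-- [remove_comments(line) for line in map(clear_line, lines) if is_setting(line)]
def filter_lines_with_settings (lines : List String) : List String :=
  (((lines.map (fun raw => pvClearLine raw.toList)).filter pvIsSetting).map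
    (fun line => String.ofList (pvRemoveComments line)))

-- ===== PORT B =====
-- B's comment cut: i = line.find('#'); if i != -1: j = line[i+1:].find('#');
-- if j != -1: line = line[:i+1+j]; then line.strip() at the append site
def pvRemoveCommentsAlt (line : List Char) : List Char :=
  let i := PySem.Chars.find line ['#']
  let line' :=
    if i ≠ -1 then
      let j := PySem.Chars.find (PySem.List.slice line (some (i + 1)) none) ['#']
      if j ≠ -1 then PySem.List.slice line none (some (i + 1 + j)) else line
    else line
  PySem.Chars.strip line'

-- explicit loop: line = ' '.join(raw.split()); skipped_prefixes = ("# ", "#-", "##", "#WHERE", "#in")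
-- and startswith(tuple) is an any-of test; result.append(...) appends the stripped, possibly cut line
def filter_lines_with_settings_alt (lines : List String) : List String :=
  lines.foldl (fun acc raw =>
    let line := PySem.Chars.join [' '] (PySem.Chars.split₀ raw.toList)
    if decide (2 < line.length) &&
        !([['#', ' '], ['#', '-'], ['#', '#'], ['#', 'W', 'H', 'E', 'R', 'E'],
           ['#', 'i', 'n']].any (fun p => PySem.Chars.startswith line p)) then
      acc ++ [String.ofList (pvRemoveCommentsAlt line)]
    else acc) []

-- ===== PRECONDITION & SPEC =====
def Spec_filter_lines_with_settings (lines : List String) (out : List String) : Prop := out = filter_lines_with_settings_alt lines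
instance (lines : List String) (out : List String) : Decidable (Spec_filter_lines_with_settings lines out) := by unfold Spec_filter_lines_with_settings; infer_instance

-- ===== CLAIM (what is proved, stated in full; the proofs are below) =====
def Claim_equal_filter_lines_with_settings : Prop := ∀ (lines : List String), Dom_filter_lines_with_settings lines → Spec_filter_lines_with_settings lines (filter_lines_with_settings lines)

-- ===== LEMMAS AND PROOFS =====
theorem go_find (c : Char) : ∀ (l : List Char) (k : Nat),
    PySem.Chars.find.go [c] l k = if c ∈ l then ((k + l.idxOf c : Nat) : Int) else -1 := by
  intro l
  induction l with
  | nil => intro k; simp [PySem.Chars.find.go]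
  | cons hd t ih =>
    intro k
    by_cases hc : hd = c
    · subst hc
      have hp : List.isPrefixOf [hd] (hd :: t) = true := by simp [List.isPrefixOf]
      simp [PySem.Chars.find.go, hp, List.idxOf_cons]
    · have hp : List.isPrefixOf [c] (hd :: t) = false := by
        simp [List.isPrefixOf, hc]; intro h'; exact absurd h'.symm hc
      simp only [PySem.Chars.find.go, hp, Bool.false_eq_true, if_false, ih]
      by_cases hm : c ∈ t
      · simp [hm, hc, List.idxOf_cons, Ne.symm hc]
        push_cast; ring
      · simp [hm, hc]; intro h'; exact absurd h'.symm hc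

theorem pv_find_char (cs : List Char) (c : Char) :
    PySem.Chars.find cs [c] = if c ∈ cs then ((cs.idxOf c : Nat) : Int) else -1 := by
  simp [PySem.Chars.find, go_find]

theorem pv_lstrip_noLead (l : List Char) (h0 : PySem.Chars.lstrip l = l) :
    PySem.Chars.lstrip (PySem.Chars.rstrip l) = PySem.Chars.rstrip l := by
  simp only [PySem.Chars.lstrip, PySem.Chars.rstrip] at *
  set x := (List.dropWhile PySem.Chars.isspace l.reverse).reverse with hx
  have hpre : x <+: l := by
    have := (List.dropWhile_suffix (l := l.reverse) PySem.Chars.isspace).reverse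
    simpa [hx] using this
  cases hxe : x with
  | nil => simp
  | cons a t =>
    obtain ⟨r, hr⟩ := hpre
    rw [List.dropWhile_cons_of_neg]
    have : l = a :: (t ++ r) := by rw [← hr, hxe]; simp
    rw [this] at h0
    by_contra hcon
    simp only [List.dropWhile_cons_of_pos (by simpa using hcon)] at h0
    have := congrArg List.length h0
    have hle := List.length_dropWhile_le PySem.Chars.isspace (t ++ r)
    simp only [List.length_append, List.length_cons] at this hle
    omega

theorem pv_rstrip_rstrip (x : List Char) :
    PySem.Chars.rstrip (PySem.Chars.rstrip x) = PySem.Chars.rstrip x := by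
  simp only [PySem.Chars.rstrip]
  rw [List.reverse_reverse, List.dropWhile_idempotent]

theorem pv_strip_strip (cs : List Char) :
    PySem.Chars.strip (PySem.Chars.strip cs) = PySem.Chars.strip cs := by
  simp only [PySem.Chars.strip]
  rw [pv_lstrip_noLead _ (by simp [PySem.Chars.lstrip, List.dropWhile_idempotent]),
    pv_rstrip_rstrip]

theorem go_split_trail (sp : Char) (hs : PySem.Chars.isspace sp = true) :
    ∀ (s cur : List Char) (acc : List (List Char)),
      PySem.Chars.split₀.go (s ++ [sp]) cur acc = PySem.Chars.split₀.go s cur acc := by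
  intro s
  induction s with
  | nil =>
    intro cur acc
    by_cases hc : cur.isEmpty <;> simp [PySem.Chars.split₀.go, hs, hc]
  | cons h t ih =>
    intro cur acc
    by_cases hsp : PySem.Chars.isspace h <;> by_cases hc : cur.isEmpty <;>
      simp [PySem.Chars.split₀.go, hsp, hc, ih]

theorem go_split_trail_all (t : List Char) (ht : ∀ x ∈ t, PySem.Chars.isspace x = true) :
    ∀ (s : List Char) (acc : List (List Char)),
      PySem.Chars.split₀.go (s ++ t) [] acc = PySem.Chars.split₀.go s [] acc := by
  induction t using List.reverseRecOn with
  | nil => simp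
  | append_singleton t' sp ih =>
    intro s acc
    rw [← List.append_assoc, go_split_trail sp (ht sp (by simp)) (s ++ t')]
    exact ih (fun x hx => ht x (by simp [hx])) s acc

theorem go_split_lead (s : List Char) :
    ∀ acc, PySem.Chars.split₀.go (List.dropWhile PySem.Chars.isspace s) [] acc
      = PySem.Chars.split₀.go s [] acc := by
  induction s with
  | nil => intro acc; simp
  | cons h t ih =>
    intro acc
    by_cases hsp : PySem.Chars.isspace h
    · rw [List.dropWhile_cons_of_pos hsp]
      rw [ih acc]
      simp [PySem.Chars.split₀.go, hsp]
    · rw [List.dropWhile_cons_of_neg (by simpa using hsp)]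

theorem pv_split₀_strip (cs : List Char) :
    PySem.Chars.split₀ (PySem.Chars.strip cs) = PySem.Chars.split₀ cs := by
  simp only [PySem.Chars.split₀, PySem.Chars.strip, PySem.Chars.lstrip, PySem.Chars.rstrip]
  have key : ∀ t : List Char,
      PySem.Chars.split₀.go ((List.dropWhile PySem.Chars.isspace t.reverse).reverse) [] []
        = PySem.Chars.split₀.go t [] [] := by
    intro t
    have hd2 : (List.dropWhile PySem.Chars.isspace t.reverse).reverse
        ++ (List.takeWhile PySem.Chars.isspace t.reverse).reverse = t := by
      rw [← List.reverse_append, List.takeWhile_append_dropWhile, List.reverse_reverse]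
    have ht : ∀ x ∈ (List.takeWhile PySem.Chars.isspace t.reverse).reverse,
        PySem.Chars.isspace x = true := by
      intro x hx
      exact List.mem_takeWhile_imp (by simpa using hx)
    calc PySem.Chars.split₀.go ((List.dropWhile PySem.Chars.isspace t.reverse).reverse) [] []
        = PySem.Chars.split₀.go ((List.dropWhile PySem.Chars.isspace t.reverse).reverse
            ++ (List.takeWhile PySem.Chars.isspace t.reverse).reverse) [] [] :=
          (go_split_trail_all _ ht _ _).symm
      _ = PySem.Chars.split₀.go t [] [] := by rw [hd2]
  rw [key, go_split_lead]

theorem pv_alt_low (cs : List Char) (h : cs.count '#' ≤ 1) :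
    pvRemoveCommentsAlt cs = PySem.Chars.strip cs := by
  unfold pvRemoveCommentsAlt
  by_cases hm : '#' ∈ cs
  · obtain ⟨u, v, he, hv⟩ := pv_mem_last_split cs '#' hm
    have hu : '#' ∉ u := by
      intro hcu
      have h2 : cs.count '#' = u.count '#' + ('#' :: v).count '#' := by
        rw [he, List.count_append]
      simp [List.count_cons] at h2
      have h1 := List.count_pos_iff.mpr hcu
      omega
    have hidx : cs.idxOf '#' = u.length := by
      rw [he, List.idxOf_append_of_notMem hu]
      simp
    have hfind : PySem.Chars.find cs ['#'] = (u.length : Int) := by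
      rw [pv_find_char, if_pos hm, hidx]
    simp only [hfind]
    have h1 : ((u.length : Int) + 1) = ((u.length + 1 : Nat) : Int) := by push_cast; ring
    rw [if_pos (by omega), h1, PySem.List.slice_from _ (by positivity), Int.toNat_natCast]
    have hdrop : List.drop (u.length + 1) cs = v := by
      rw [he, List.drop_append, List.drop_of_length_le (by omega)]
      simp
    rw [hdrop, pv_find_char, if_neg hv, if_neg (by simp)]
  · rw [pv_find_char, if_neg hm]
    simp

theorem pv_alt_high (u v : List Char) (hv : '#' ∉ v) (hu : '#' ∈ u) :
    pvRemoveCommentsAlt (u ++ '#' :: v) = PySem.Chars.strip (pvRemoveCommentsAlt u) := by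
  set cs := u ++ '#' :: v with hcs
  have hm : '#' ∈ cs := by simp [hcs]
  set m := u.idxOf '#' with hmdef
  have hmlt : m < u.length := List.idxOf_lt_length_of_mem hu
  have hidx : cs.idxOf '#' = m := by rw [hcs, List.idxOf_append_of_mem hu]
  have hfind : PySem.Chars.find cs ['#'] = (m : Int) := by
    rw [pv_find_char, if_pos hm, hidx]
  have hfindu : PySem.Chars.find u ['#'] = (m : Int) := by
    rw [pv_find_char, if_pos hu]
  set w := List.drop (m + 1) u with hwdef
  have hwlen : w.length = u.length - (m + 1) := by rw [hwdef]; simp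
  have hcast : ((m : Int) + 1) = ((m + 1 : Nat) : Int) := by push_cast; ring
  have hsl2 : PySem.List.slice u (some ((m : Int) + 1)) none = w := by
    rw [hcast, PySem.List.slice_from _ (by positivity), Int.toNat_natCast, hwdef]
  have hsl1 : PySem.List.slice cs (some ((m : Int) + 1)) none = w ++ '#' :: v := by
    rw [hcast, PySem.List.slice_from _ (by positivity), Int.toNat_natCast, hcs,
      List.drop_append, show m + 1 - u.length = 0 from by omega, List.drop_zero, hwdef]
  unfold pvRemoveCommentsAlt
  simp only [hfind, hfindu, hsl1, hsl2]
  by_cases hw : '#' ∈ w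
  · -- at least three '#': both cut at the same second occurrence
    have hj : PySem.Chars.find (w ++ '#' :: v) ['#'] = (w.idxOf '#' : Int) := by
      rw [pv_find_char, if_pos (by simp [hw]), List.idxOf_append_of_mem hw]
    have hju : PySem.Chars.find w ['#'] = (w.idxOf '#' : Int) := by
      rw [pv_find_char, if_pos hw]
    have hwlt : w.idxOf '#' < w.length := List.idxOf_lt_length_of_mem hw
    simp only [hj, hju]
    rw [if_pos (show (m : Int) ≠ -1 from by omega),
      if_pos (show (m : Int) ≠ -1 from by omega),
      if_pos (show (w.idxOf '#' : Int) ≠ -1 from by omega),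
      if_pos (show (w.idxOf '#' : Int) ≠ -1 from by omega)]
    have hM : ((m : Int) + 1 + (w.idxOf '#' : Int)) = ((m + 1 + w.idxOf '#' : Nat) : Int) := by
      push_cast; ring
    rw [hM, PySem.List.slice_to _ (by positivity), PySem.List.slice_to _ (by positivity),
      Int.toNat_natCast]
    have htake : List.take (m + 1 + w.idxOf '#') cs = List.take (m + 1 + w.idxOf '#') u := by
      rw [hcs, List.take_append,
        show m + 1 + w.idxOf '#' - u.length = 0 from by omega, List.take_zero, List.append_nil]
    rw [htake, pv_strip_strip]
  · -- exactly two '#': B cuts cs at u.length, i.e. keeps exactly u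
    have hj : PySem.Chars.find (w ++ '#' :: v) ['#'] = ((w.length : Nat) : Int) := by
      rw [pv_find_char, if_pos (by simp), List.idxOf_append_of_notMem hw, List.idxOf_cons_self,
        Nat.add_zero]
    have hju : PySem.Chars.find w ['#'] = -1 := by rw [pv_find_char, if_neg hw]
    simp only [hj, hju]
    rw [if_pos (show (m : Int) ≠ -1 from by omega),
      if_pos (show (m : Int) ≠ -1 from by omega),
      if_pos (show (w.length : Int) ≠ -1 from by omega),
      if_neg (show ¬ (-1 : Int) ≠ -1 from by omega)]
    have hM : ((m : Int) + 1 + (w.length : Int)) = ((u.length : Nat) : Int) := by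
      push_cast; omega
    rw [hM, PySem.List.slice_to _ (by positivity), Int.toNat_natCast]
    rw [hcs, List.take_left, pv_strip_strip]

theorem pv_remove_eq_n : ∀ (n : Nat) (cs : List Char), cs.length ≤ n →
    pvRemoveComments cs = pvRemoveCommentsAlt cs := by
  intro n
  induction n with
  | zero =>
    intro cs h
    have : cs = [] := List.eq_nil_of_length_eq_zero (by omega)
    subst this
    rw [pvRemoveComments, pv_alt_low [] (by simp)]
    simp [pv_count_char]
  | succ n ih =>
    intro cs hlen
    rw [pvRemoveComments]
    by_cases hk : PySem.Chars.count cs ['#'] > 1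
    · rw [dif_pos hk]
      rw [pv_count_char] at hk
      obtain ⟨u, v, he, hv⟩ := pv_mem_last_split cs '#' (List.count_pos_iff.mp (by omega))
      have hcnt : cs.count '#' = u.count '#' + 1 := by
        rw [he, List.count_append]
        simp [List.count_cons, hv, List.count_eq_zero.mpr hv]
      have hu : '#' ∈ u := List.count_pos_iff.mp (by omega)
      have hrf : PySem.Chars.rfind cs ['#'] = (u.length : Int) := by
        rw [he]; exact pv_rfind_char u v '#' hv
      have hslice : PySem.List.slice cs none (some (PySem.Chars.rfind cs ['#'])) = u := by
        rw [hrf, PySem.List.slice_to _ (by positivity), Int.toNat_natCast, he, List.take_left]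
      rw [hslice]
      have hulen : u.length ≤ n := by
        have : cs.length = u.length + v.length + 1 := by rw [he]; simp; omega
        omega
      rw [ih u hulen, he, pv_alt_high u v hv hu]
    · rw [dif_neg hk]
      rw [pv_count_char] at hk
      rw [pv_alt_low cs (by omega)]

theorem pv_remove_eq (cs : List Char) : pvRemoveComments cs = pvRemoveCommentsAlt cs :=
  pv_remove_eq_n cs.length cs le_rfl

theorem pv_isEmpty_filter {α : Type} (p : α → Bool) (l : List α) :
    (l.filter p).isEmpty = !(l.any p) := by
  induction l with
  | nil => rfl
  | cons h t ih => by_cases hp : p h <;> simp [List.filter_cons, hp, ih]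

-- ===== VERDICT (by name: the statement is the Claim_ definition above) =====
theorem filter_lines_with_settings_spec : Claim_equal_filter_lines_with_settings := by
  intro lines _
  unfold Spec_filter_lines_with_settings filter_lines_with_settings filter_lines_with_settings_alt
  rw [show (fun (acc : List String) (raw : String) =>
        let line := PySem.Chars.join [' '] (PySem.Chars.split₀ raw.toList)
        if decide (2 < line.length) &&
            !([['#', ' '], ['#', '-'], ['#', '#'], ['#', 'W', 'H', 'E', 'R', 'E'],
               ['#', 'i', 'n']].any (fun p => PySem.Chars.startswith line p)) then
          acc ++ [String.ofList (pvRemoveCommentsAlt line)]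
        else acc) =
      (fun acc raw =>
        if (fun raw => pvIsSetting (pvClearLine raw.toList)) raw = true then
          acc ++ [(fun raw => String.ofList (pvRemoveComments (pvClearLine raw.toList))) raw]
        else acc) from ?_]
  · rw [PySem.List.foldl_append_if]
    simp [List.filter_map, List.map_map, Function.comp_def]
  · funext acc raw
    simp only [pvClearLine, pv_split₀_strip, pvIsSetting, pvSkippedPrefixes,
      pv_isEmpty_filter, pv_remove_eq, gt_iff_lt]
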